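-- pv_equiv track=rewrite | github.com/Koni4749/math_quiz_gcd | app.py | get_needed_number_for_square
-- ===== SOURCE A (Python) =====
-- def get_needed_number_for_square(n):
--     result = 1
--     d = 2
--     temp = n
--     while d*d <= temp:
--         if temp % d == 0:
--             count = 0
--             while temp % d == 0:
--                 count += 1
--                 temp //= d
--             if count % 2 != 0:
--                 result *= d
--         d += 1
--     if temp > 1:
--         result *= temp
--     return result
-- ===== SOURCE B (Python) =====
-- def get_needed_number_for_square(n):
--     # The needed multiplier is the squarefree part of n, i.e. n divided by its
--     # largest perfect-square divisor.  Find the largest k with k*k | n directly.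
--     if n < 2:
--         return 1
--     best = 1
--     k = 2
--     while k * k <= n:
--         if n % (k * k) == 0:
--             best = k
--         k += 1
--     return n // (best * best)
-- ===== Notes on version B (the rewrite author's own statement) =====
-- stated objective: alternative
-- what changed: B does no prime factorization at all: instead of trial-dividing out each prime and tracking exponent parity, it scans k = 2..sqrt(n) for the largest k with k*k dividing n (the largest perfect-square divisor) and returns n // (k*k); correct because the squarefree part of n is exactly n divided by its maximal square divisor.
import Mathlib
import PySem

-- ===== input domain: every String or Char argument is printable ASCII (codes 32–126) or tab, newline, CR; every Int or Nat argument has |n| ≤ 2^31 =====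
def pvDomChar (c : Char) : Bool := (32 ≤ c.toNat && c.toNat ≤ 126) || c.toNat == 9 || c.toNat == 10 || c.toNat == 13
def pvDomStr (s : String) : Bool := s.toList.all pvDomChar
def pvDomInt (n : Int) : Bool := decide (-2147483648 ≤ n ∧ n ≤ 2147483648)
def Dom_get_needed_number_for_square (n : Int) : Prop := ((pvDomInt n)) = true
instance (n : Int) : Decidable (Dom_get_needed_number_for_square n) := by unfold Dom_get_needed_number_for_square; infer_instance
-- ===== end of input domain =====

-- B computes the same answer by a different algorithm: instead of factoring n and
-- multiplying the odd-exponent primes, it searches for the largest k with k*k | n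
-- (the maximal perfect-square divisor) and returns n // (k*k); objective: alternative.

-- ===== PORT A =====
-- Loops are ported as structural recursion on a fuel argument; the top-level calls pass
-- fuel provably larger than the number of iterations, so fuel is a totality device only.

-- A's inner `while temp % d == 0: count += 1; temp //= d` loop.
def divOutA (fuel : Nat) (count temp d : Int) : Int × Int :=
  match fuel with
  | 0 => (count, temp)
  | f + 1 =>
    if PySem.Int.mod temp d = 0 then
      divOutA f (count + 1) (PySem.Int.floordiv temp d) d
    else (count, temp)

-- A's outer `while d*d <= temp` loop, returning the final (result, temp).
def loopA (fuel : Nat) (result d temp : Int) : Int × Int :=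
  match fuel with
  | 0 => (result, temp)
  | f + 1 =>
    if d * d ≤ temp then
      if PySem.Int.mod temp d = 0 then
        loopA f
          (if PySem.Int.mod (divOutA (temp.toNat + 1) 0 temp d).1 2 ≠ 0 then result * d else result)
          (d + 1) (divOutA (temp.toNat + 1) 0 temp d).2
      else
        loopA f result (d + 1) temp
    else (result, temp)

def get_needed_number_for_square (n : Int) : Int :=
  if 1 < (loopA (n.toNat + 2) 1 2 n).2 then
    (loopA (n.toNat + 2) 1 2 n).1 * (loopA (n.toNat + 2) 1 2 n).2
  else (loopA (n.toNat + 2) 1 2 n).1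

-- ===== PORT B =====
-- Source B's `while k*k <= n` scan keeping the largest k with n % (k*k) == 0.
def loopB (fuel : Nat) (best k n : Int) : Int :=
  match fuel with
  | 0 => best
  | f + 1 =>
    if k * k ≤ n then
      loopB f (if PySem.Int.mod n (k * k) = 0 then k else best) (k + 1) n
    else best

def get_needed_number_for_square_alt (n : Int) : Int :=
  if n < 2 then 1
  else
    PySem.Int.floordiv n (loopB (n.toNat + 2) 1 2 n * loopB (n.toNat + 2) 1 2 n)

-- ===== PRECONDITION & SPEC =====
def Spec_get_needed_number_for_square (n : Int) (out : Int) : Prop := out = get_needed_number_for_square_alt n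
instance (n : Int) (out : Int) : Decidable (Spec_get_needed_number_for_square n out) := by unfold Spec_get_needed_number_for_square; infer_instance

-- ===== CLAIM (what is proved, stated in full; the proofs are below) =====
def Claim_equal_get_needed_number_for_square : Prop := ∀ (n : Int), Dom_get_needed_number_for_square n → Spec_get_needed_number_for_square n (get_needed_number_for_square n)

-- ===== LEMMAS AND PROOFS =====

theorem divOutA_spec (fuel : Nat) (count temp d : Int) (hf : temp.toNat < fuel)
    (hd : 2 ≤ d) (ht : 0 < temp) :
    ∃ k : ℕ, (divOutA fuel count temp d).1 = count + (k : Int) ∧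
      temp = d ^ k * (divOutA fuel count temp d).2 ∧
      ¬ d ∣ (divOutA fuel count temp d).2 ∧ 0 < (divOutA fuel count temp d).2 := by
  induction fuel generalizing count temp with
  | zero => omega
  | succ f ih =>
    rw [divOutA]
    by_cases h1 : PySem.Int.mod temp d = 0
    · rw [if_pos h1]
      obtain ⟨q, hq⟩ := (PySem.Int.mod_eq_zero_iff_dvd temp d).mp h1
      have hfd : PySem.Int.floordiv temp d = q := by
        rw [PySem.Int.floordiv_eq_ediv_of_pos (by omega), hq,
          Int.mul_ediv_cancel_left q (by omega)]
      have hqpos : 0 < q := by nlinarith [hq ▸ ht]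
      have hqlt : q < temp := by nlinarith
      obtain ⟨k, hk1, hk2, hk3, hk4⟩ := ih (count + 1) (PySem.Int.floordiv temp d)
        (by rw [hfd]; omega) (hfd ▸ hqpos)
      refine ⟨k + 1, ?_, ?_, hk3, hk4⟩
      · rw [hk1]; push_cast; ring
      · rw [hfd] at hk2 ⊢
        rw [hq, pow_succ]
        linear_combination d * hk2
    · rw [if_neg h1]
      refine ⟨0, by simp, by simp, ?_, ht⟩
      intro hdvd
      exact h1 ((PySem.Int.mod_eq_zero_iff_dvd temp d).mpr hdvd)

-- An integer ≥ 2 with no divisor in [2, d) and below d*d is prime.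
theorem prime_of_no_small_divisor (t d : Int) (hd : 2 ≤ d) (h2 : 2 ≤ t) (hlt : t < d * d)
    (hnd : ∀ m : Int, 2 ≤ m → m < d → ¬ m ∣ t) : Prime t := by
  rw [Int.prime_iff_natAbs_prime, Nat.prime_def_lt]
  refine ⟨by omega, ?_⟩
  intro m hm hmd
  by_contra hm1
  have hmz : m ≠ 0 := by
    rintro rfl
    have := Nat.eq_zero_of_zero_dvd hmd
    omega
  have hdvd : (m : Int) ∣ t := by
    rw [← Int.natAbs_dvd_natAbs]
    simpa using hmd
  obtain ⟨q, hq⟩ := hdvd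
  have hm2 : (2 : Int) ≤ (m : Int) := by omega
  have hmt : (m : Int) < t := by omega
  have hqpos : 0 < q := by nlinarith
  have hq2 : 2 ≤ q := by
    by_contra hq1
    have : q = 1 := by omega
    rw [this, mul_one] at hq
    omega
  rcases lt_or_ge (m : Int) d with hmlt | hmge
  · exact hnd m hm2 hmlt ⟨q, hq⟩
  · have hqlt : q < d := by
      by_contra hcon
      push Not at hcon
      have hdd : d * d ≤ (m : Int) * q := mul_le_mul hmge hcon (by omega) (by omega)
      linarith [hq]
    exact hnd q hq2 hqlt ⟨m, by rw [hq]; ring⟩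

-- If p is prime and does not divide r, then r and p are relatively prime.
theorem isRelPrime_of_prime_not_dvd (p r : Int) (hp : Prime p) (h : ¬ p ∣ r) :
    IsRelPrime r p := by
  intro e her hep
  obtain ⟨c, hc⟩ := hep
  rcases hp.irreducible.isUnit_or_isUnit hc with h1 | h1
  · exact h1
  · exfalso
    obtain ⟨v, hv⟩ := IsUnit.exists_right_inv h1
    have hpe : p ∣ e := ⟨v, by rw [hc]; rw [mul_assoc, hv, mul_one]⟩
    exact h (hpe.trans her)

-- Valuation argument over ℕ: if c is squarefree and a² divides b²·c then a divides b.
theorem nat_sq_dvd_sq_mul (a b c : Nat) (ha : a ≠ 0) (hb : b ≠ 0) (hc : Squarefree c)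
    (h : a ^ 2 ∣ b ^ 2 * c) : a ∣ b := by
  have hc0 : c ≠ 0 := hc.ne_zero
  rw [← Nat.factorization_le_iff_dvd ha hb]
  intro p
  have h2 := (Nat.factorization_le_iff_dvd (pow_ne_zero 2 ha)
    (mul_ne_zero (pow_ne_zero 2 hb) hc0)).mpr h p
  rw [Nat.factorization_pow, Nat.factorization_mul (pow_ne_zero 2 hb) hc0,
    Nat.factorization_pow] at h2
  have h3 := hc.natFactorization_le_one p
  simp only [Finsupp.smul_apply, Finsupp.coe_add, Pi.add_apply, smul_eq_mul] at h2
  omega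

-- The same over ℤ for positive integers.
theorem int_sq_dvd_sq_mul (k s R : Int) (hk : 0 < k) (hs : 0 < s) (_hR : 0 < R)
    (hsq : Squarefree R) (h : k * k ∣ s * s * R) : k ∣ s := by
  have hn : k.natAbs ^ 2 ∣ s.natAbs ^ 2 * R.natAbs := by
    have := Int.natAbs_dvd_natAbs.mpr h
    simpa [Int.natAbs_mul, pow_two] using this
  have := nat_sq_dvd_sq_mul k.natAbs s.natAbs R.natAbs (by omega) (by omega)
    (Int.squarefree_natAbs.mpr hsq) hn
  exact Int.natAbs_dvd_natAbs.mp this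

-- A's outer loop: n's square part is split off as s², and what remains (result·temp)
-- is squarefree and positive.
theorem loopA_spec (fuel : Nat) (result d temp : Int)
    (hfuel : (temp + 1 - d).toNat < fuel)
    (hd : 2 ≤ d) (ht : 0 < temp) (hr : 0 < result)
    (hnd : ∀ m : Int, 2 ≤ m → m < d → ¬ m ∣ temp)
    (hsq : Squarefree result)
    (hrb : ∀ p : Int, Prime p → p ∣ result → p < d) :
    ∃ s : Int, 0 < s ∧
      result * temp = s * s * ((loopA fuel result d temp).1 * (loopA fuel result d temp).2) ∧
      Squarefree ((loopA fuel result d temp).1 * (loopA fuel result d temp).2) ∧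
      0 < (loopA fuel result d temp).1 ∧ 0 < (loopA fuel result d temp).2 := by
  induction fuel generalizing result d temp with
  | zero => omega
  | succ f ih =>
    rw [loopA]
    by_cases hg : d * d ≤ temp
    · rw [if_pos hg]
      by_cases hdvd : PySem.Int.mod temp d = 0
      · rw [if_pos hdvd]
        have hddvd : d ∣ temp := (PySem.Int.mod_eq_zero_iff_dvd temp d).mp hdvd
        have hdt : d < temp := by nlinarith
        have hdp : Prime d := by
          apply prime_of_no_small_divisor d d hd hd (by nlinarith)
          intro m hm2 hmd hmdd
          exact hnd m hm2 hmd (hmdd.trans hddvd)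
        obtain ⟨k, hk1, hk2, hk3, hk4⟩ :=
          divOutA_spec (temp.toNat + 1) 0 temp d (by omega) hd ht
        set t' := (divOutA (temp.toNat + 1) 0 temp d).2 with ht'
        have hkpos : k ≠ 0 := by
          rintro rfl
          rw [pow_zero, one_mul] at hk2
          exact hk3 (hk2 ▸ hddvd)
        have hdk : d ≤ d ^ k := le_self_pow₀ (by omega) hkpos
        have hone : (1:Int) ≤ d ^ k := by omega
        have htlt : t' < temp := by nlinarith
        have hnd' : ∀ m : Int, 2 ≤ m → m < d + 1 → ¬ m ∣ t' := by
          intro m hm2 hmd hmdvd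
          rcases lt_or_ge m d with hlt | hge
          · exact hnd m hm2 hlt (hmdvd.trans ⟨d ^ k, by rw [hk2]; ring⟩)
          · have : m = d := by omega
            exact hk3 (this ▸ hmdvd)
        have hr2 : result * temp = d ^ k * (result * t') := by rw [hk2]; ring
        -- the new result for each parity
        rcases Nat.even_or_odd k with hpar | hpar
        · -- even exponent: result unchanged, temp := t'
          obtain ⟨j, hj⟩ := hpar
          have hcmod : ¬ PySem.Int.mod (divOutA (temp.toNat + 1) 0 temp d).1 2 ≠ 0 := by
            rw [hk1, PySem.Int.mod_eq_emod_of_pos (by norm_num)]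
            simp only [zero_add, ne_eq, not_not]
            omega
          rw [if_neg hcmod]
          obtain ⟨s, hs1, hs2, hs3, hs4, hs5⟩ := ih result (d + 1) t'
            (by omega) (by omega) hk4 hr hnd' hsq
            (fun p hp hpd => lt_trans (hrb p hp hpd) (by omega))
          refine ⟨d ^ j * s, by positivity, ?_, hs3, hs4, hs5⟩
          rw [hr2, hs2, hj]
          ring
        · -- odd exponent: result := result * d, temp := t'
          obtain ⟨j, hj⟩ := hpar
          have hcmod : PySem.Int.mod (divOutA (temp.toNat + 1) 0 temp d).1 2 ≠ 0 := by
            rw [hk1, PySem.Int.mod_eq_emod_of_pos (by norm_num)]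
            simp only [zero_add, ne_eq]
            omega
          rw [if_pos hcmod]
          have hdnr : ¬ d ∣ result := fun hdr => absurd (hrb d hdp hdr) (by omega)
          have hsq' : Squarefree (result * d) :=
            squarefree_mul_iff.mpr ⟨isRelPrime_of_prime_not_dvd d result hdp hdnr,
              hsq, hdp.squarefree⟩
          have hrb' : ∀ p : Int, Prime p → p ∣ result * d → p < d + 1 := by
            intro p hp hpd
            rcases hp.dvd_mul.mp hpd with h1 | h1
            · exact lt_trans (hrb p hp h1) (by omega)
            · have := Int.le_of_dvd (by omega) h1
              omega
          obtain ⟨s, hs1, hs2, hs3, hs4, hs5⟩ := ih (result * d) (d + 1) t'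
            (by omega) (by omega) hk4 (by positivity) hnd' hsq' hrb'
          refine ⟨d ^ j * s, by positivity, ?_, hs3, hs4, hs5⟩
          rw [hr2, hj]
          linear_combination (d ^ (2 * j)) * hs2
      · rw [if_neg hdvd]
        have hdt : d < temp := by nlinarith
        have hnd' : ∀ m : Int, 2 ≤ m → m < d + 1 → ¬ m ∣ temp := by
          intro m hm2 hmd hmdvd
          rcases lt_or_ge m d with hlt | hge
          · exact hnd m hm2 hlt hmdvd
          · have : m = d := by omega
            exact hdvd ((PySem.Int.mod_eq_zero_iff_dvd temp d).mpr (this ▸ hmdvd))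
        exact ih result (d + 1) temp (by omega) (by omega) ht hr hnd' hsq
          (fun p hp hpd => lt_trans (hrb p hp hpd) (by omega))
    · rw [if_neg hg]
      simp only
      refine ⟨1, by norm_num, by ring, ?_, hr, ht⟩
      rcases eq_or_lt_of_le (show (1:Int) ≤ temp by omega) with h1 | h1
      · rw [← h1, mul_one]; exact hsq
      · have htp : Prime temp := prime_of_no_small_divisor temp d hd (by omega) (by omega) hnd
        have htd : d ≤ temp := by
          by_contra hlt
          exact hnd temp (by omega) (by omega) dvd_rfl
        have hntr : ¬ temp ∣ result := fun htr => absurd (hrb temp htp htr) (by omega)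
        exact squarefree_mul_iff.mpr
          ⟨isRelPrime_of_prime_not_dvd temp result htp hntr, hsq, htp.squarefree⟩

-- B's scan returns a positive square-root divisor that dominates every candidate.
theorem loopB_spec (fuel : Nat) (best k n : Int) (hfuel : (n + 1 - k).toNat < fuel)
    (hk : 2 ≤ k) (hn : 0 < n) (hb1 : 1 ≤ best) (hbk : best < k) (hbd : best * best ∣ n)
    (hmax : ∀ j : Int, 2 ≤ j → j < k → j * j ∣ n → j ≤ best) :
    1 ≤ loopB fuel best k n ∧ loopB fuel best k n * loopB fuel best k n ∣ n ∧
      ∀ j : Int, 2 ≤ j → j * j ∣ n → j ≤ loopB fuel best k n := by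
  induction fuel generalizing best k with
  | zero => omega
  | succ f ih =>
    rw [loopB]
    by_cases hg : k * k ≤ n
    · rw [if_pos hg]
      have hkn : k < n := by nlinarith
      by_cases hdvd : PySem.Int.mod n (k * k) = 0
      · rw [if_pos hdvd]
        exact ih k (k + 1) (by omega) (by omega) (by omega) (by omega)
          ((PySem.Int.mod_eq_zero_iff_dvd n (k * k)).mp hdvd)
          (fun j hj2 hjk _ => by omega)
      · rw [if_neg hdvd]
        refine ih best (k + 1) (by omega) (by omega) (by omega) (by omega) hbd ?_
        intro j hj2 hjk hjd
        rcases lt_or_ge j k with hlt | hge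
        · exact hmax j hj2 hlt hjd
        · exfalso
          have : j = k := by omega
          exact hdvd ((PySem.Int.mod_eq_zero_iff_dvd n (k * k)).mpr (this ▸ hjd))
    · rw [if_neg hg]
      refine ⟨hb1, hbd, ?_⟩
      intro j hj2 hjd
      have hjn : j * j ≤ n := Int.le_of_dvd hn hjd
      exact hmax j hj2 (by nlinarith) hjd

-- ===== VERDICT (by name: the statement is the Claim_ definition above) =====
theorem get_needed_number_for_square_spec : Claim_equal_get_needed_number_for_square := by
  intro n _
  unfold Spec_get_needed_number_for_square
  by_cases h2 : n < 2
  · rw [get_needed_number_for_square_alt, if_pos h2, get_needed_number_for_square]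
    have hA : loopA (n.toNat + 2) 1 2 n = (1, n) := by
      obtain ⟨f, hfn⟩ : ∃ f, n.toNat + 2 = f + 1 := ⟨n.toNat + 1, rfl⟩
      rw [hfn, loopA, if_neg (by rintro hle; norm_num at hle; omega)]
    rw [hA]
    norm_num
    omega
  · push Not at h2
    obtain ⟨s, hs1, hs2, hs3, hs4, hs5⟩ := loopA_spec (n.toNat + 2) 1 2 n (by omega)
      (by norm_num) (by omega) (by norm_num)
      (fun m hm1 hm2 => absurd hm2 (by omega)) squarefree_one
      (fun p hp hpd => absurd hpd hp.not_dvd_one)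
    rw [one_mul] at hs2
    obtain ⟨hB1, hBd, hBmax⟩ := loopB_spec (n.toNat + 2) 1 2 n (by omega) (by norm_num)
      (by omega) (by norm_num) (by norm_num) (by norm_num)
      (fun j hj2 hjk _ => absurd hjk (by omega))
    have hAeq : get_needed_number_for_square n =
        (loopA (n.toNat + 2) 1 2 n).1 * (loopA (n.toNat + 2) 1 2 n).2 := by
      rw [get_needed_number_for_square]
      by_cases h1 : 1 < (loopA (n.toNat + 2) 1 2 n).2
      · rw [if_pos h1]
      · rw [if_neg h1]
        have : (loopA (n.toNat + 2) 1 2 n).2 = 1 := by omega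
        rw [this, mul_one]
    have hkey : ∀ j : Int, 2 ≤ j → j * j ∣ n → j ∣ s := by
      intro j hj2 hjd
      exact int_sq_dvd_sq_mul j s _ (by omega) hs1 (mul_pos hs4 hs5) hs3 (hs2 ▸ hjd)
    have hBs : loopB (n.toNat + 2) 1 2 n = s := by
      have hle : loopB (n.toNat + 2) 1 2 n ≤ s := by
        rcases eq_or_lt_of_le hB1 with he | hl
        · omega
        · exact Int.le_of_dvd hs1 (hkey _ (by omega) hBd)
      have hge : s ≤ loopB (n.toNat + 2) 1 2 n := by
        rcases eq_or_lt_of_le (show (1:Int) ≤ s from hs1) with he | hl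
        · omega
        · exact hBmax s (by omega) ⟨_, hs2⟩
      omega
    have hss : s * s ≠ 0 := by positivity
    rw [get_needed_number_for_square_alt, if_neg (by omega), hAeq, hBs,
      PySem.Int.floordiv_eq_ediv_of_pos (by positivity)]
    have hdiv : n / (s * s) =
        (loopA (n.toNat + 2) 1 2 n).1 * (loopA (n.toNat + 2) 1 2 n).2 := by
      conv_lhs => rw [hs2]
      exact Int.mul_ediv_cancel_left _ hss
    exact hdiv.symm
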